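-- pv_equiv track=rewrite | github.com/jtiosue/PythonGames | Roomba/Rumba.py | find_accessable_tiles
-- ===== SOURCE A (Python) =====
-- from collections import deque
--
-- def get_neighbors(position):
--     """
--     Generator. Yields positions to the left, to the right,
--     above, and below the current position.
--     """
--     deltas = [(1, 0), (-1, 0), (0, 1), (0, -1)]
--     for d in deltas:
--         yield position[0]+d[0], position[1]+d[1]
--
-- def find_accessable_tiles(grid, position):
--     """
--     Finds all tiles that are accessable from starting position.
--     Returns a set of all accessable tiles.
--     """
--     accessable = set()
--     accessable.add(position)
--     tile_queue = deque() #imported from collections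
--     tile_queue.append(position)
--     while tile_queue:
--         current = tile_queue.popleft()
--         for n in get_neighbors(current):
--             if n in grid and n not in accessable and not grid[n]:
--                 accessable.add(n)
--                 tile_queue.append(n)
--     return accessable
-- ===== SOURCE B (Python) =====
-- def find_accessable_tiles(grid, position):
--     """
--     Finds all tiles that are accessable from starting position,
--     by a recursive depth-first flood fill.
--     Returns a set of all accessable tiles.
--     """
--     accessable = {position}
--     _fill(grid, accessable, position)
--     return accessable
--
-- def _fill(grid, accessable, tile):
--     """Recursive DFS: mark tile, then recurse into each new walkable neighbor."""
--     accessable.add(tile)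
--     x, y = tile
--     for n in ((x + 1, y), (x - 1, y), (x, y + 1), (x, y - 1)):
--         if n in grid and n not in accessable and not grid[n]:
--             _fill(grid, accessable, n)
-- ===== Notes on version B (the rewrite author's own statement) =====
-- stated objective: alternative
-- what changed: Replaced the deque-based breadth-first flood fill by a recursive depth-first flood fill: a helper adds the tile and recurses into each new walkable neighbor, so the queue and the get_neighbors generator disappear and tiles are discovered in depth-first rather than breadth-first order (the returned set is the same).
import Mathlib
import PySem

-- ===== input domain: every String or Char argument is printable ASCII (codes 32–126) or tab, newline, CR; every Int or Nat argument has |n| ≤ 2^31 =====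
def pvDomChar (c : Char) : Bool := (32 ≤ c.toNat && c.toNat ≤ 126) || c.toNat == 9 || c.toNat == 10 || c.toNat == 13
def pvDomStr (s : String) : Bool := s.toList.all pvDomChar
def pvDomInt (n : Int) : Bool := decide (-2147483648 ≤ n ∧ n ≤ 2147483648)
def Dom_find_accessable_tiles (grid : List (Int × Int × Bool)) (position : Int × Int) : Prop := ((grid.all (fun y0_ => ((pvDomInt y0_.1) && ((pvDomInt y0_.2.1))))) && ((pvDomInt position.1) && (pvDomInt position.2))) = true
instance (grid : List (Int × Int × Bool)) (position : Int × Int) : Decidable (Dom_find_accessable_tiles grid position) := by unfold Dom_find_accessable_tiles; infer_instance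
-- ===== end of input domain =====

-- B replaces A's deque-based breadth-first flood fill by a recursive depth-first flood
-- fill (same accessible SET; a Python set is unordered, so both ports return its distinct
-- elements in canonical lexicographic order). Objective: alternative decomposition.

-- ===== PORT A =====

-- `grid` is a Python dict keyed by (x, y) pairs; lookup is first match in the
-- association list (exact for a dict, whose keys are unique).
def lookupTile (grid : List (Int × Int × Bool)) (n : Int × Int) : Option Bool :=
  (grid.find? (fun e => (e.1, e.2.1) == n)).map (fun e => e.2.2)

-- the body of A's `for n in get_neighbors(current): if n in grid and n not in
-- accessable and not grid[n]: accessable.add(n); tile_queue.append(n)`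
def visit (grid : List (Int × Int × Bool)) (s : PySem.Set (Int × Int) × List (Int × Int))
    (n : Int × Int) : PySem.Set (Int × Int) × List (Int × Int) :=
  if (lookupTile grid n).isSome && !(PySem.Set.contains s.1 n) && !((lookupTile grid n).getD false)
  then (PySem.Set.add s.1 n, s.2 ++ [n]) else s

-- get_neighbors: yields position+d for d in deltas
def neighbors (p : Int × Int) : List (Int × Int) :=
  [((1 : Int), (0 : Int)), (-1, 0), (0, 1), (0, -1)].map (fun d => (p.1 + d.1, p.2 + d.2))

-- number of distinct grid keys not yet in `acc` — termination measure only
def unvisited (grid : List (Int × Int × Bool)) (acc : PySem.Set (Int × Int)) : Nat :=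
  (PySem.List.dedup (grid.map (fun e => (e.1, e.2.1)))).countP (fun k => !(acc.contains k))

theorem countP_lt_of {α : Type} (l : List α) (p q : α → Bool)
    (hsub : ∀ x ∈ l, q x = true → p x = true) (n : α) (hn : n ∈ l)
    (hp : p n = true) (hq : q n = false) : l.countP q < l.countP p := by
  induction l with
  | nil => cases hn
  | cons a l ih =>
    rcases List.mem_cons.mp hn with rfl | hn'
    · have hmono : l.countP q ≤ l.countP p :=
        List.countP_mono_left (fun x hx => hsub x (List.mem_cons_of_mem _ hx))
      simp [hp, hq]
      omega
    · have hlt : l.countP q < l.countP p :=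
        ih (fun x hx => hsub x (List.mem_cons_of_mem _ hx)) hn'
      by_cases hqa : q a = true
      · have hpa := hsub a List.mem_cons_self hqa
        simp [hpa, hqa]; omega
      · simp only [List.countP_cons]
        have : (if q a = true then 1 else 0) ≤ (if p a = true then 1 else 0) := by
          split <;> simp_all
        omega

theorem unvisited_mono_subset (grid : List (Int × Int × Bool))
    (a b : PySem.Set (Int × Int)) (hab : ∀ x, x ∈ a → x ∈ b) :
    unvisited grid b ≤ unvisited grid a := by
  refine List.countP_mono_left (fun x _ h => ?_)
  simp only [PySem.Set.contains_eq_listContains, List.contains_eq_mem] at h ⊢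
  simp at h ⊢
  intro hx
  exact h (hab x hx)

theorem unvisited_add_le (grid : List (Int × Int × Bool)) (acc : PySem.Set (Int × Int))
    (n : Int × Int) : unvisited grid (PySem.Set.add acc n) ≤ unvisited grid acc :=
  unvisited_mono_subset grid acc _ (fun x hx => by
    simp [PySem.Set.mem_add (α := Int × Int)]; exact Or.inl hx)

theorem unvisited_add_lt (grid : List (Int × Int × Bool)) (acc : PySem.Set (Int × Int))
    (n : Int × Int) (hmem : (lookupTile grid n).isSome = true)
    (hnc : acc.contains n = false) :
    unvisited grid (PySem.Set.add acc n) < unvisited grid acc := by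
  have hn : n ∈ PySem.List.dedup (grid.map (fun e => (e.1, e.2.1))) := by
    rw [PySem.List.mem_dedup]
    simp only [lookupTile, Option.isSome_map] at hmem
    rcases Option.isSome_iff_exists.mp hmem with ⟨e, he⟩
    have hkey := List.find?_some he
    have hmm : e ∈ grid := List.mem_of_find?_eq_some he
    have : (e.1, e.2.1) = n := by simpa using hkey
    exact this ▸ List.mem_map_of_mem hmm
  refine countP_lt_of _ _ _ (fun x _ h => ?_) n hn ?_ ?_
  · simp only [PySem.Set.contains_eq_listContains, List.contains_eq_mem,
      PySem.Set.mem_add (α := Int × Int)] at h ⊢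
    simp at h ⊢
    tauto
  · simpa [List.contains_eq_mem] using hnc
  · simp [PySem.Set.contains_eq_listContains, List.contains_eq_mem,
      PySem.Set.mem_add (α := Int × Int)]

theorem visit_measure (grid : List (Int × Int × Bool))
    (s : PySem.Set (Int × Int) × List (Int × Int)) (n : Int × Int) :
    unvisited grid (visit grid s n).1 + (visit grid s n).2.length ≤
      unvisited grid s.1 + s.2.length ∧
    unvisited grid (visit grid s n).1 ≤ unvisited grid s.1 := by
  unfold visit
  split
  · next h =>
    simp only [Bool.and_eq_true, Bool.not_eq_true'] at h
    have hlt := unvisited_add_lt grid s.1 n h.1.1 h.1.2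
    have hle := unvisited_add_le grid s.1 n
    simp only [List.length_append, List.length_cons, List.length_nil]
    omega
  · omega

theorem foldl_visit_measure (grid : List (Int × Int × Bool)) (ns : List (Int × Int)) :
    ∀ (s : PySem.Set (Int × Int) × List (Int × Int)),
    unvisited grid (ns.foldl (visit grid) s).1 + (ns.foldl (visit grid) s).2.length ≤
      unvisited grid s.1 + s.2.length ∧
    unvisited grid (ns.foldl (visit grid) s).1 ≤ unvisited grid s.1 := by
  induction ns with
  | nil => intro s; simp
  | cons n ns ih =>
    intro s
    have h1 := visit_measure grid s n
    have h2 := ih (visit grid s n)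
    simp only [List.foldl_cons]
    omega

-- A's main loop: pop from the front of the queue, push discovered tiles at the back.
def bfsA (grid : List (Int × Int × Bool)) (acc : PySem.Set (Int × Int))
    (queue : List (Int × Int)) : PySem.Set (Int × Int) :=
  match queue with
  | [] => acc
  | cur :: rest =>
      let st := (neighbors cur).foldl (visit grid) (acc, rest)
      bfsA grid st.1 st.2
termination_by 2 * unvisited grid acc + queue.length
decreasing_by
  have h := foldl_visit_measure grid (neighbors cur) (acc, rest)
  simp only [List.length_cons] at h ⊢
  omega

-- A returns the set `accessable`; a Python set carries no observable order, so the port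
-- returns its distinct elements sorted lexicographically (an order-independent, exact
-- representation of the set value; B's port returns the same canonical form).
def find_accessable_tiles (grid : List (Int × Int × Bool)) (position : Int × Int) : List (Int × Int) :=
  PySem.List.sorted (bfsA grid (PySem.Set.add PySem.Set.empty position) [position])
    (fun p => toLex p) false

-- ===== PORT B =====

-- B inlines the four neighbor tuples of `(x, y)`
def nbrList (t : Int × Int) : List (Int × Int) :=
  [(t.1 + 1, t.2), (t.1 - 1, t.2), (t.1, t.2 + 1), (t.1, t.2 - 1)]

-- the `for n in (...)` loop of B's `_fill`, recursing through `rec` into new tiles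
def dfsGo (grid : List (Int × Int × Bool))
    (rec : PySem.Set (Int × Int) → Int × Int → PySem.Set (Int × Int)) :
    PySem.Set (Int × Int) → List (Int × Int) → PySem.Set (Int × Int)
  | acc, [] => acc
  | acc, n :: ns =>
      if (lookupTile grid n).isSome && !(PySem.Set.contains acc n) && !((lookupTile grid n).getD false)
      then dfsGo grid rec (rec acc n) ns
      else dfsGo grid rec acc ns

-- B's `_fill(grid, accessable, tile)`; the Nat argument is fuel making the Python
-- recursion structural — `grid.length + 1` provably suffices (dfsB_spec below), so the
-- fuel-exhausted branch is never taken on the calls the ports make.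
def dfsB (grid : List (Int × Int × Bool)) : Nat → PySem.Set (Int × Int) → Int × Int → PySem.Set (Int × Int)
  | 0, acc, _ => acc
  | f + 1, acc, t => dfsGo grid (dfsB grid f) (PySem.Set.add acc t) (nbrList t)

def find_accessable_tiles_alt (grid : List (Int × Int × Bool)) (position : Int × Int) : List (Int × Int) :=
  PySem.List.sorted
    (dfsB grid (grid.length + 1) (PySem.Set.add PySem.Set.empty position) position)
    (fun p => toLex p) false

-- ===== PRECONDITION & SPEC =====
def Spec_find_accessable_tiles (grid : List (Int × Int × Bool)) (position : Int × Int) (out : List (Int × Int)) : Prop := out = find_accessable_tiles_alt grid position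
instance (grid : List (Int × Int × Bool)) (position : Int × Int) (out : List (Int × Int)) : Decidable (Spec_find_accessable_tiles grid position out) := by unfold Spec_find_accessable_tiles; infer_instance

-- ===== CLAIM (what is proved, stated in full; the proofs are below) =====
def Claim_equal_find_accessable_tiles : Prop := ∀ (grid : List (Int × Int × Bool)) (position : Int × Int), Dom_find_accessable_tiles grid position → Spec_find_accessable_tiles grid position (find_accessable_tiles grid position)

-- ===== LEMMAS AND PROOFS =====

-- `n` is a walkable tile of the grid: `n in grid and not grid[n]`
def walk (grid : List (Int × Int × Bool)) (n : Int × Int) : Prop :=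
  lookupTile grid n = some false

-- the tiles accessable from `p`: `p` itself and walkable neighbors of accessable tiles
inductive Reach (grid : List (Int × Int × Bool)) (p : Int × Int) : Int × Int → Prop
  | base : Reach grid p p
  | step (m n : Int × Int) : Reach grid p m → n ∈ neighbors m → walk grid n → Reach grid p n

theorem visit_cond_iff (grid : List (Int × Int × Bool)) (acc : PySem.Set (Int × Int))
    (n : Int × Int) :
    ((lookupTile grid n).isSome && !(PySem.Set.contains acc n) && !((lookupTile grid n).getD false)) = true
      ↔ walk grid n ∧ n ∉ acc := by
  unfold walk
  cases h : lookupTile grid n with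
  | none => simp
  | some b =>
    cases b <;>
      simp [PySem.Set.contains_eq_listContains, List.contains_eq_mem]

theorem mem_visit_fst (grid : List (Int × Int × Bool))
    (s : PySem.Set (Int × Int) × List (Int × Int)) (n x : Int × Int) :
    x ∈ (visit grid s n).1 ↔ x ∈ s.1 ∨ (x = n ∧ walk grid n) := by
  unfold visit
  split
  · next h =>
    rcases (visit_cond_iff grid s.1 n).mp h with ⟨hw, _⟩
    simp [PySem.Set.mem_add (α := Int × Int)]
    tauto
  · next h =>
    constructor
    · exact Or.inl
    · rintro (hx | ⟨rfl, hw⟩)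
      · exact hx
      · -- the guard failed yet `x` is walkable: `x` must already be in the set
        by_cases hc : x ∈ s.1
        · exact hc
        · exfalso
          exact h ((visit_cond_iff grid s.1 x).mpr ⟨hw, hc⟩)

theorem visit_fst_mono (grid : List (Int × Int × Bool))
    (s : PySem.Set (Int × Int) × List (Int × Int)) (n x : Int × Int)
    (hx : x ∈ s.1) : x ∈ (visit grid s n).1 :=
  (mem_visit_fst grid s n x).mpr (Or.inl hx)

theorem mem_visit_snd (grid : List (Int × Int × Bool))
    (s : PySem.Set (Int × Int) × List (Int × Int)) (n x : Int × Int) :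
    x ∈ (visit grid s n).2 → x ∈ s.2 ∨ (x = n ∧ walk grid n) := by
  unfold visit
  split
  · next h =>
    rcases (visit_cond_iff grid s.1 n).mp h with ⟨hw, _⟩
    simp
    tauto
  · exact Or.inl

theorem visit_snd_mono (grid : List (Int × Int × Bool))
    (s : PySem.Set (Int × Int) × List (Int × Int)) (n x : Int × Int)
    (hx : x ∈ s.2) : x ∈ (visit grid s n).2 := by
  unfold visit
  split <;> simp [hx]

theorem visit_new_in_queue (grid : List (Int × Int × Bool))
    (s : PySem.Set (Int × Int) × List (Int × Int)) (n x : Int × Int)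
    (hx : x ∈ (visit grid s n).1) : x ∈ s.1 ∨ x ∈ (visit grid s n).2 := by
  revert hx
  unfold visit
  split
  · simp [PySem.Set.mem_add (α := Int × Int)]
    tauto
  · exact Or.inl

theorem visit_covers (grid : List (Int × Int × Bool))
    (s : PySem.Set (Int × Int) × List (Int × Int)) (n : Int × Int)
    (hw : walk grid n) : n ∈ (visit grid s n).1 :=
  (mem_visit_fst grid s n n).mpr (Or.inr ⟨rfl, hw⟩)

theorem visit_nodup (grid : List (Int × Int × Bool))
    (s : PySem.Set (Int × Int) × List (Int × Int)) (n : Int × Int)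
    (h : s.1.Nodup) : (visit grid s n).1.Nodup := by
  unfold visit
  split
  · exact PySem.Set.nodup_add _ _ h
  · exact h

theorem foldl_visit_fst_mono (grid : List (Int × Int × Bool)) (ns : List (Int × Int)) :
    ∀ (s : PySem.Set (Int × Int) × List (Int × Int)) (x : Int × Int),
      x ∈ s.1 → x ∈ (ns.foldl (visit grid) s).1 := by
  induction ns with
  | nil => intro s x hx; exact hx
  | cons n ns ih =>
    intro s x hx
    exact ih (visit grid s n) x (visit_fst_mono grid s n x hx)

theorem foldl_visit_snd_mono (grid : List (Int × Int × Bool)) (ns : List (Int × Int)) :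
    ∀ (s : PySem.Set (Int × Int) × List (Int × Int)) (x : Int × Int),
      x ∈ s.2 → x ∈ (ns.foldl (visit grid) s).2 := by
  induction ns with
  | nil => intro s x hx; exact hx
  | cons n ns ih =>
    intro s x hx
    exact ih (visit grid s n) x (visit_snd_mono grid s n x hx)

theorem mem_foldl_visit_fst (grid : List (Int × Int × Bool)) (ns : List (Int × Int)) :
    ∀ (s : PySem.Set (Int × Int) × List (Int × Int)) (x : Int × Int),
      x ∈ (ns.foldl (visit grid) s).1 → x ∈ s.1 ∨ (x ∈ ns ∧ walk grid x) := by
  induction ns with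
  | nil => intro s x hx; exact Or.inl hx
  | cons n ns ih =>
    intro s x hx
    rcases ih (visit grid s n) x hx with h | ⟨hm, hw⟩
    · rcases (mem_visit_fst grid s n x).mp h with h' | ⟨rfl, hw⟩
      · exact Or.inl h'
      · exact Or.inr ⟨List.mem_cons_self, hw⟩
    · exact Or.inr ⟨List.mem_cons_of_mem _ hm, hw⟩

theorem mem_foldl_visit_snd (grid : List (Int × Int × Bool)) (ns : List (Int × Int)) :
    ∀ (s : PySem.Set (Int × Int) × List (Int × Int)) (x : Int × Int),
      x ∈ (ns.foldl (visit grid) s).2 → x ∈ s.2 ∨ (x ∈ ns ∧ walk grid x) := by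
  induction ns with
  | nil => intro s x hx; exact Or.inl hx
  | cons n ns ih =>
    intro s x hx
    rcases ih (visit grid s n) x hx with h | ⟨hm, hw⟩
    · rcases mem_visit_snd grid s n x h with h' | ⟨rfl, hw⟩
      · exact Or.inl h'
      · exact Or.inr ⟨List.mem_cons_self, hw⟩
    · exact Or.inr ⟨List.mem_cons_of_mem _ hm, hw⟩

theorem foldl_visit_new_in_queue (grid : List (Int × Int × Bool)) (ns : List (Int × Int)) :
    ∀ (s : PySem.Set (Int × Int) × List (Int × Int)) (x : Int × Int),
      x ∈ (ns.foldl (visit grid) s).1 → x ∈ s.1 ∨ x ∈ (ns.foldl (visit grid) s).2 := by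
  induction ns with
  | nil => intro s x hx; exact Or.inl hx
  | cons n ns ih =>
    intro s x hx
    rcases ih (visit grid s n) x hx with h | h
    · rcases visit_new_in_queue grid s n x h with h' | h'
      · exact Or.inl h'
      · exact Or.inr (foldl_visit_snd_mono grid ns (visit grid s n) x h')
    · exact Or.inr h

theorem foldl_visit_covers (grid : List (Int × Int × Bool)) (ns : List (Int × Int)) :
    ∀ (s : PySem.Set (Int × Int) × List (Int × Int)) (n : Int × Int),
      n ∈ ns → walk grid n → n ∈ (ns.foldl (visit grid) s).1 := by
  induction ns with
  | nil => intro s n hn; cases hn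
  | cons m ns ih =>
    intro s n hn hw
    rcases List.mem_cons.mp hn with rfl | hn'
    · exact foldl_visit_fst_mono grid ns (visit grid s n) n (visit_covers grid s n hw)
    · exact ih (visit grid s m) n hn' hw

theorem foldl_visit_nodup (grid : List (Int × Int × Bool)) (ns : List (Int × Int)) :
    ∀ (s : PySem.Set (Int × Int) × List (Int × Int)),
      s.1.Nodup → (ns.foldl (visit grid) s).1.Nodup := by
  induction ns with
  | nil => intro s h; exact h
  | cons n ns ih =>
    intro s h
    exact ih (visit grid s n) (visit_nodup grid s n h)

-- monotonicity, duplicate-freeness, soundness and closedness of A's loop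

theorem bfsA_mono (grid : List (Int × Int × Bool)) :
    ∀ (acc : PySem.Set (Int × Int)) (queue : List (Int × Int)) (x : Int × Int),
      x ∈ acc → x ∈ bfsA grid acc queue := by
  intro acc queue
  induction acc, queue using bfsA.induct grid with
  | case1 acc => intro x hx; rw [bfsA]; exact hx
  | case2 acc cur rest st ih =>
    intro x hx
    rw [bfsA]
    exact ih x (foldl_visit_fst_mono grid (neighbors cur) (acc, rest) x hx)

theorem bfsA_nodup (grid : List (Int × Int × Bool)) :
    ∀ (acc : PySem.Set (Int × Int)) (queue : List (Int × Int)),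
      acc.Nodup → (bfsA grid acc queue).Nodup := by
  intro acc queue
  induction acc, queue using bfsA.induct grid with
  | case1 acc => intro h; rw [bfsA]; exact h
  | case2 acc cur rest st ih =>
    intro h
    rw [bfsA]
    exact ih (foldl_visit_nodup grid (neighbors cur) (acc, rest) h)

theorem bfsA_sound (grid : List (Int × Int × Bool)) (p : Int × Int) :
    ∀ (acc : PySem.Set (Int × Int)) (queue : List (Int × Int)),
      (∀ y ∈ acc, Reach grid p y) → (∀ y ∈ queue, Reach grid p y) →
      ∀ x ∈ bfsA grid acc queue, Reach grid p x := by
  intro acc queue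
  induction acc, queue using bfsA.induct grid with
  | case1 acc => intro ha _ x hx; rw [bfsA] at hx; exact ha x hx
  | case2 acc cur rest st ih =>
    intro ha hq x hx
    rw [bfsA] at hx
    have hcur : Reach grid p cur := hq cur List.mem_cons_self
    refine ih ?_ ?_ x hx
    · intro y hy
      rcases mem_foldl_visit_fst grid (neighbors cur) (acc, rest) y hy with h | ⟨hn, hw⟩
      · exact ha y h
      · exact Reach.step cur y hcur hn hw
    · intro y hy
      rcases mem_foldl_visit_snd grid (neighbors cur) (acc, rest) y hy with h | ⟨hn, hw⟩
      · exact hq y (List.mem_cons_of_mem _ h)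
      · exact Reach.step cur y hcur hn hw

-- every member of `acc` is still queued or already has all its walkable neighbors in `acc`
theorem bfsA_closed (grid : List (Int × Int × Bool)) :
    ∀ (acc : PySem.Set (Int × Int)) (queue : List (Int × Int)),
      (∀ x ∈ acc, x ∈ queue ∨ ∀ n ∈ neighbors x, walk grid n → n ∈ acc) →
      ∀ x ∈ bfsA grid acc queue, ∀ n ∈ neighbors x, walk grid n → n ∈ bfsA grid acc queue := by
  intro acc queue
  induction acc, queue using bfsA.induct grid with
  | case1 acc =>
    intro hinv x hx n hn hw
    rw [bfsA] at *
    rcases hinv x hx with h | h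
    · cases h
    · exact h n hn hw
  | case2 acc cur rest st ih =>
    intro hinv
    rw [bfsA]
    refine ih ?_
    intro x hx
    rcases foldl_visit_new_in_queue grid (neighbors cur) (acc, rest) x hx with hxa | hxq
    · rcases hinv x hxa with hq | hcl
      · rcases List.mem_cons.mp hq with rfl | hr
        · -- x = cur: all its walkable neighbors were folded in
          exact Or.inr (fun n hn hw => foldl_visit_covers grid (neighbors x) (acc, rest) n hn hw)
        · exact Or.inl (foldl_visit_snd_mono grid (neighbors cur) (acc, rest) x hr)
      · exact Or.inr (fun n hn hw =>
          foldl_visit_fst_mono grid (neighbors cur) (acc, rest) n (hcl n hn hw))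
    · exact Or.inl hxq

-- membership in A's final set is exactly reachability
theorem bfsA_mem_iff (grid : List (Int × Int × Bool)) (p : Int × Int) (x : Int × Int) :
    x ∈ bfsA grid (PySem.Set.add PySem.Set.empty p) [p] ↔ Reach grid p x := by
  constructor
  · refine bfsA_sound grid p _ _ ?_ ?_ x
    · intro y hy
      have : y = p := by
        simpa [PySem.Set.mem_add (α := Int × Int), PySem.Set.empty] using hy
      exact this ▸ Reach.base
    · intro y hy
      have : y = p := by simpa using hy
      exact this ▸ Reach.base
  · intro hr
    have hcl := bfsA_closed grid (PySem.Set.add PySem.Set.empty p) [p]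
      (fun x hx => Or.inl (by
        have : x = p := by
          simpa [PySem.Set.mem_add (α := Int × Int), PySem.Set.empty] using hx
        simp [this]))
    have hp : p ∈ bfsA grid (PySem.Set.add PySem.Set.empty p) [p] :=
      bfsA_mono grid _ _ p (by simp [PySem.Set.empty])
    induction hr with
    | base => exact hp
    | step m n hm hn hw ihm => exact hcl m ihm n hn hw

-- ----- B side -----

theorem nbrList_eq (t : Int × Int) : nbrList t = neighbors t := by
  simp [nbrList, neighbors]
  omega

theorem dfsGo_mono (grid : List (Int × Int × Bool))
    (rec : PySem.Set (Int × Int) → Int × Int → PySem.Set (Int × Int))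
    (hrec : ∀ a n x, x ∈ a → x ∈ rec a n) :
    ∀ (ns : List (Int × Int)) (acc : PySem.Set (Int × Int)) (x : Int × Int),
      x ∈ acc → x ∈ dfsGo grid rec acc ns := by
  intro ns
  induction ns with
  | nil => intro acc x hx; exact hx
  | cons n ns ih =>
    intro acc x hx
    rw [dfsGo]
    split
    · exact ih (rec acc n) x (hrec acc n x hx)
    · exact ih acc x hx

theorem dfsB_mono (grid : List (Int × Int × Bool)) :
    ∀ (f : Nat) (acc : PySem.Set (Int × Int)) (t x : Int × Int),
      x ∈ acc → x ∈ dfsB grid f acc t := by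
  intro f
  induction f with
  | zero => intro acc t x hx; exact hx
  | succ f ih =>
    intro acc t x hx
    rw [dfsB]
    exact dfsGo_mono grid (dfsB grid f) (fun a n x hx => ih a n x hx) (nbrList t)
      (PySem.Set.add acc t) x (by simp [PySem.Set.mem_add (α := Int × Int)]; exact Or.inl hx)

theorem dfsGo_nodup (grid : List (Int × Int × Bool))
    (rec : PySem.Set (Int × Int) → Int × Int → PySem.Set (Int × Int))
    (hrec : ∀ a n, a.Nodup → (rec a n).Nodup) :
    ∀ (ns : List (Int × Int)) (acc : PySem.Set (Int × Int)),
      acc.Nodup → (dfsGo grid rec acc ns).Nodup := by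
  intro ns
  induction ns with
  | nil => intro acc h; exact h
  | cons n ns ih =>
    intro acc h
    rw [dfsGo]
    split
    · exact ih (rec acc n) (hrec acc n h)
    · exact ih acc h

theorem dfsB_nodup (grid : List (Int × Int × Bool)) :
    ∀ (f : Nat) (acc : PySem.Set (Int × Int)) (t : Int × Int),
      acc.Nodup → (dfsB grid f acc t).Nodup := by
  intro f
  induction f with
  | zero => intro acc t h; exact h
  | succ f ih =>
    intro acc t h
    rw [dfsB]
    exact dfsGo_nodup grid (dfsB grid f) (fun a n ha => ih a n ha) (nbrList t)
      (PySem.Set.add acc t) (PySem.Set.nodup_add _ _ h)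

theorem dfsB_sound (grid : List (Int × Int × Bool)) (p : Int × Int) :
    ∀ (f : Nat) (acc : PySem.Set (Int × Int)) (t : Int × Int),
      (∀ y ∈ acc, Reach grid p y) → Reach grid p t →
      ∀ x ∈ dfsB grid f acc t, Reach grid p x := by
  intro f
  induction f with
  | zero => intro acc t ha _ x hx; exact ha x hx
  | succ f ih =>
    intro acc t ha ht x hx
    rw [dfsB] at hx
    -- strengthen to the inner loop: all of acc reachable, all walkable list members reachable
    have hgo : ∀ (ns : List (Int × Int)) (a : PySem.Set (Int × Int)),
        (∀ y ∈ a, Reach grid p y) → (∀ n ∈ ns, walk grid n → Reach grid p n) →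
        ∀ x ∈ dfsGo grid (dfsB grid f) a ns, Reach grid p x := by
      intro ns
      induction ns with
      | nil => intro a ha' _ x hx'; exact ha' x hx'
      | cons n ns ihn =>
        intro a ha' hn x hx'
        rw [dfsGo] at hx'
        split at hx'
        · next hc =>
          rcases (visit_cond_iff grid a n).mp hc with ⟨hw, _⟩
          exact ihn (dfsB grid f a n)
            (fun y hy => ih a n ha' (hn n List.mem_cons_self hw) y hy)
            (fun m hm => hn m (List.mem_cons_of_mem _ hm)) x hx'
        · exact ihn a ha' (fun m hm => hn m (List.mem_cons_of_mem _ hm)) x hx'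
    refine hgo (nbrList t) (PySem.Set.add acc t) ?_ ?_ x hx
    · intro y hy
      rcases (PySem.Set.mem_add _ _ _).mp hy with h | rfl
      · exact ha y h
      · exact ht
    · intro n hn hw
      exact Reach.step t n ht (nbrList_eq t ▸ hn) hw

-- with enough fuel, DFS covers the start tile, its walkable neighbors, and is closed
-- at every tile it added
theorem dfsB_spec (grid : List (Int × Int × Bool)) :
    ∀ (f : Nat) (acc : PySem.Set (Int × Int)) (t : Int × Int),
      unvisited grid (PySem.Set.add acc t) + 1 ≤ f →
      t ∈ dfsB grid f acc t ∧
      (∀ n ∈ nbrList t, walk grid n → n ∈ dfsB grid f acc t) ∧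
      (∀ x ∈ dfsB grid f acc t, x ∉ acc →
        ∀ n ∈ neighbors x, walk grid n → n ∈ dfsB grid f acc t) := by
  intro f
  induction f with
  | zero => intro acc t hf; omega
  | succ f ih =>
    intro acc t hf
    -- the inner loop lemma, with rec = dfsB grid f specified by ih
    have hgo : ∀ (ns : List (Int × Int)) (a : PySem.Set (Int × Int)),
        unvisited grid a ≤ f →
        (∀ x, x ∈ a → x ∈ dfsGo grid (dfsB grid f) a ns) ∧
        (∀ n ∈ ns, walk grid n → n ∈ dfsGo grid (dfsB grid f) a ns) ∧
        (∀ x ∈ dfsGo grid (dfsB grid f) a ns, x ∉ a →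
          ∀ n ∈ neighbors x, walk grid n → n ∈ dfsGo grid (dfsB grid f) a ns) := by
      intro ns
      induction ns with
      | nil =>
        intro a _
        refine ⟨fun x hx => hx, fun n hn => absurd hn (List.not_mem_nil), ?_⟩
        intro x hx hxa
        exact absurd hx hxa
      | cons n ns ihn =>
        intro a hA
        rw [dfsGo]
        split
        · next hc =>
          rcases (visit_cond_iff grid a n).mp hc with ⟨hw, hna⟩
          have hsome : (lookupTile grid n).isSome = true := by
            unfold walk at hw; simp [hw]
          have hncB : a.contains n = false := by
            simp [PySem.Set.contains_eq_listContains, List.contains_eq_mem]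
            exact hna
          have hlt := unvisited_add_lt grid a n hsome hncB
          -- the recursive call at (a, n) has enough fuel
          have hfn : unvisited grid (PySem.Set.add a n) + 1 ≤ f := by omega
          obtain ⟨hn1, hn2, hn3⟩ := ih a n hfn
          have hmono : ∀ x, x ∈ a → x ∈ dfsB grid f a n := fun x hx => dfsB_mono grid f a n x hx
          have hsub : ∀ x, x ∈ PySem.Set.add a n → x ∈ dfsB grid f a n := by
            intro x hx
            rcases (PySem.Set.mem_add _ _ _).mp hx with h | rfl
            · exact hmono x h
            · exact hn1
          have hA' : unvisited grid (dfsB grid f a n) ≤ f := by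
            have h1 := unvisited_mono_subset grid (PySem.Set.add a n) (dfsB grid f a n) hsub
            omega
          obtain ⟨hg1, hg2, hg3⟩ := ihn (dfsB grid f a n) hA'
          refine ⟨fun x hx => hg1 x (hmono x hx), ?_, ?_⟩
          · intro m hm hwm
            rcases List.mem_cons.mp hm with rfl | hm'
            · exact hg1 m hn1
            · exact hg2 m hm' hwm
          · intro x hx hxa m hm hwm
            by_cases hxd : x ∈ dfsB grid f a n
            · exact hg1 m (hn3 x hxd hxa m hm hwm)
            · exact hg3 x hx hxd m hm hwm
        · next hc =>
          obtain ⟨hg1, hg2, hg3⟩ := ihn a hA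
          refine ⟨hg1, ?_, hg3⟩
          intro m hm hwm
          rcases List.mem_cons.mp hm with rfl | hm'
          · -- the guard failed on a walkable tile: it is already in the set
            have hma : m ∈ a := by
              by_cases h : m ∈ a
              · exact h
              · exact absurd ((visit_cond_iff grid a m).mpr ⟨hwm, h⟩) hc
            exact hg1 m hma
          · exact hg2 m hm' hwm
    rw [dfsB]
    have hA : unvisited grid (PySem.Set.add acc t) ≤ f := by omega
    obtain ⟨hg1, hg2, hg3⟩ := hgo (nbrList t) (PySem.Set.add acc t) hA
    refine ⟨hg1 t (by simp [PySem.Set.mem_add (α := Int × Int)]), hg2, ?_⟩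
    intro x hx hxacc m hm hwm
    by_cases hxt : x = t
    · exact hg2 m (by rw [nbrList_eq]; exact hxt ▸ hm) hwm
    · refine hg3 x hx ?_ m hm hwm
      intro hxa
      rcases (PySem.Set.mem_add _ _ _).mp hxa with h | h
      · exact hxacc h
      · exact hxt h

theorem unvisited_le_length (grid : List (Int × Int × Bool)) (acc : PySem.Set (Int × Int)) :
    unvisited grid acc ≤ grid.length := by
  unfold unvisited
  calc (PySem.List.dedup (grid.map (fun e => (e.1, e.2.1)))).countP _
      ≤ (PySem.List.dedup (grid.map (fun e => (e.1, e.2.1)))).length := List.countP_le_length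
    _ ≤ (grid.map (fun e => (e.1, e.2.1))).length := by
        rw [PySem.List.dedup_eq_ofList]; exact PySem.Set.length_ofList_le _
    _ = grid.length := List.length_map _

-- membership in B's final set is exactly reachability
theorem dfsB_mem_iff (grid : List (Int × Int × Bool)) (p : Int × Int) (x : Int × Int) :
    x ∈ dfsB grid (grid.length + 1) (PySem.Set.add PySem.Set.empty p) p ↔ Reach grid p x := by
  have hfuel : unvisited grid (PySem.Set.add (PySem.Set.add PySem.Set.empty p) p) + 1 ≤ grid.length + 1 := by
    have := unvisited_le_length grid (PySem.Set.add (PySem.Set.add PySem.Set.empty p) p)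
    omega
  obtain ⟨h1, h2, h3⟩ := dfsB_spec grid (grid.length + 1) (PySem.Set.add PySem.Set.empty p) p hfuel
  constructor
  · refine dfsB_sound grid p _ _ _ ?_ Reach.base x
    intro y hy
    have : y = p := by
      simpa [PySem.Set.mem_add (α := Int × Int), PySem.Set.empty] using hy
    exact this ▸ Reach.base
  · intro hr
    induction hr with
    | base => exact h1
    | step m n hm hn hw ihm =>
      by_cases hmp : m = p
      · exact h2 n (by rw [nbrList_eq]; exact hmp ▸ hn) hw
      · refine h3 m ihm ?_ n hn hw
        intro hma
        have : m = p := by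
          simpa [PySem.Set.mem_add (α := Int × Int), PySem.Set.empty] using hma
        exact hmp this

-- ===== VERDICT (by name: the statement is the Claim_ definition above) =====
theorem find_accessable_tiles_spec : Claim_equal_find_accessable_tiles := by
  intro grid position _
  unfold Spec_find_accessable_tiles find_accessable_tiles find_accessable_tiles_alt
  refine PySem.List.sorted_eq_sorted_of_perm _ _ _ (toLex.injective) ?_
  refine (List.perm_ext_iff_of_nodup ?_ ?_).mpr ?_
  · exact bfsA_nodup grid _ _ (PySem.Set.nodup_add _ _ List.nodup_nil)
  · exact dfsB_nodup grid _ _ _ (PySem.Set.nodup_add _ _ List.nodup_nil)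
  · intro x
    rw [bfsA_mem_iff grid position x, dfsB_mem_iff grid position x]
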